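-- pv_equiv track=rewrite | github.com/rolitoxdd/generador-horarios-udp | prev_work/utils.py | parsear_horario
-- ===== SOURCE A (Python) =====
-- def parsear_horario(horario_texto):
--     respuesta = []
--     if horario_texto:
--         bloques = {
--             "08:30 - 09:50": "A",
--             "10:00 - 11:20": "B",
--             "11:30 - 12:50": "C",
--             "13:00 - 14:20": "D",
--             "14:30 - 15:50": "E",
--             "16:00 - 17:20": "F",
--             "17:25 - 18:45": "G",
--             "18:50 - 20:10": "H",
--             "20:15 - 21:35": "I"
--         }
--         bloques_extendidos = {
--             "08:30 - 11:20": "AB",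
--             "10:00 - 12:50": "BC",
--             "11:30 - 14:20": "CD",
--             "13:00 - 15:50": "DE",
--             "14:30 - 17:20": "EF",
--             "16:00 - 18:45": "FG",
--             "17:25 - 20:10": "GH",
--             "18:50 - 21:30": "HI",
--             "18:50 - 21:35": "HI",
--
--         }
--         horarios_evento = horario_texto.split(";")
--         horarios_evento = [[x[:-14].strip(), x[-13:]] for x in horarios_evento]
--         for horario in horarios_evento:
--             if horario[1] in bloques:
--                 bloque = bloques[horario[1]]
--                 if len(horario[0]) > 2:
--                     horarios = horario[0].split()
--                     respuesta.extend([[h, bloque] for h in horarios])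
--                 else:
--                     respuesta.extend([[horario[0], bloque]])
--             else:
--                 bloquex = bloques_extendidos[horario[1]]
--                 if len(horario[0]) > 2:
--                     horarios = horario[0].split()
--                     respuesta.extend([[h, bloquex[0]] for h in horarios])
--                     respuesta.extend([[h, bloquex[1]] for h in horarios])
--                 else:
--                     respuesta.extend([[horario[0], bloquex[0]]])
--                     respuesta.extend([[horario[0], bloquex[1]]])
--
--     return respuesta
-- ===== SOURCE B (Python) =====
-- def parsear_horario(horario_texto):
--     # Instead of slot->letters tables, derive the block letters arithmetically:
--     # map the start time and the end time of the slot to letter indices and emit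
--     # the whole index range via chr arithmetic on the index.  This is correct because the
--     # nine simple blocks map start==end to the same index, and every extended
--     # block spans exactly the consecutive indices between its endpoints.
--     if not horario_texto:
--         return []
--     inicio = {"08:30": 0, "10:00": 1, "11:30": 2, "13:00": 3, "14:30": 4,
--               "16:00": 5, "17:25": 6, "18:50": 7, "20:15": 8}
--     fin = {"09:50": 0, "11:20": 1, "12:50": 2, "14:20": 3, "15:50": 4,
--            "17:20": 5, "18:45": 6, "20:10": 7, "21:30": 8, "21:35": 8}
--     respuesta = []
--     for x in horario_texto.split(";"):
--         nombre = x[:-14].strip()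
--         slot = x[-13:]
--         i = inicio[slot[:5]]
--         j = fin[slot[-5:]]
--         nombres = nombre.split() if len(nombre) > 2 else [nombre]
--         for k in range(i, j + 1):
--             letra = chr(ord("A") + k)
--             respuesta.extend([n, letra] for n in nombres)
--     return respuesta
-- ===== Notes on version B (the rewrite author's own statement) =====
-- stated objective: alternative
-- what changed: B drops the two slot-to-letters dictionaries and four branches entirely: it maps the slot's start time and end time to letter indices via two small time tables and emits the letters of the whole index range by chr arithmetic on the index, which coincides with the original tables on every valid slot.
import Mathlib
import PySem

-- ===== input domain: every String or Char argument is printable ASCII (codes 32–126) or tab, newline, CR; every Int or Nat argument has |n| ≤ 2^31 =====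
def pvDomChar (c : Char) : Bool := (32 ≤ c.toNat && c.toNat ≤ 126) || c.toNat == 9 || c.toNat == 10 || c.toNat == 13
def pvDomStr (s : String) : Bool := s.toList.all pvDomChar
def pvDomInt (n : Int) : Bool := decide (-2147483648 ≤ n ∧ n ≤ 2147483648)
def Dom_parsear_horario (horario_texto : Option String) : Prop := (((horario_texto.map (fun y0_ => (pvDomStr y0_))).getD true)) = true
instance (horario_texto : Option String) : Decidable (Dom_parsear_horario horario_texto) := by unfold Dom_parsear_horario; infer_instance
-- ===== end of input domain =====

-- B replaces A's two slot→letters dictionaries and four branches by an arithmetic scheme: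
-- the slot's start and end times map to letter indices and the letters of the whole index
-- range are emitted by chr arithmetic on the index (objective: alternative, same cost).

-- ===== PORT A =====
def bloquesA : PySem.Dict String String := PySem.Dict.ofList [
  ("08:30 - 09:50", "A"), ("10:00 - 11:20", "B"), ("11:30 - 12:50", "C"),
  ("13:00 - 14:20", "D"), ("14:30 - 15:50", "E"), ("16:00 - 17:20", "F"),
  ("17:25 - 18:45", "G"), ("18:50 - 20:10", "H"), ("20:15 - 21:35", "I")]

def bloquesExtA : PySem.Dict String String := PySem.Dict.ofList [
  ("08:30 - 11:20", "AB"), ("10:00 - 12:50", "BC"), ("11:30 - 14:20", "CD"),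
  ("13:00 - 15:50", "DE"), ("14:30 - 17:20", "EF"), ("16:00 - 18:45", "FG"),
  ("17:25 - 20:10", "GH"), ("18:50 - 21:30", "HI"), ("18:50 - 21:35", "HI")]

/-- The body of A's `for horario in horarios_evento` loop.
`getD … ""` stands for the raising lookup; Pre_ keeps the key present (KeyError excluded). -/
def stepA (respuesta : List (List String)) (horario : String × String) : List (List String) :=
  if bloquesA.contains horario.2 then
    let bloque := bloquesA.getD horario.2 ""
    if 2 < PySem.Str.len horario.1 then
      respuesta ++ (PySem.Str.split₀ horario.1).map (fun h => [h, bloque])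
    else
      respuesta ++ [[horario.1, bloque]]
  else
    let bloquex := bloquesExtA.getD horario.2 ""
    if 2 < PySem.Str.len horario.1 then
      let horarios := PySem.Str.split₀ horario.1
      (respuesta ++ horarios.map (fun h => [h, String.ofList [bloquex.toList.getD 0 ' ']]))
        ++ horarios.map (fun h => [h, String.ofList [bloquex.toList.getD 1 ' ']])
    else
      (respuesta ++ [[horario.1, String.ofList [bloquex.toList.getD 0 ' ']]])
        ++ [[horario.1, String.ofList [bloquex.toList.getD 1 ' ']]]

def parsear_horario (horario_texto : Option String) : List (List String) :=
  match horario_texto with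
  | none => []
  | some s =>
    if s.toList.isEmpty then [] else
      let horarios_evento := ((PySem.Str.split? s ";").getD []).map
        (fun x => (PySem.Str.strip (PySem.Str.slice x none (some (-14))),
                   PySem.Str.slice x (some (-13)) none))
      horarios_evento.foldl stepA []

-- ===== PORT B =====
def inicioB : PySem.Dict String Int := PySem.Dict.ofList [
  ("08:30", 0), ("10:00", 1), ("11:30", 2), ("13:00", 3), ("14:30", 4),
  ("16:00", 5), ("17:25", 6), ("18:50", 7), ("20:15", 8)]

def finB : PySem.Dict String Int := PySem.Dict.ofList [
  ("09:50", 0), ("11:20", 1), ("12:50", 2), ("14:20", 3), ("15:50", 4),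
  ("17:20", 5), ("18:45", 6), ("20:10", 7), ("21:30", 8), ("21:35", 8)]

/-- B's inner `for k in range(i, j+1)` loop; Python's chr(ord of the base letter + k) is ported by hand as
`Char.ofNat (65+k).toNat`, exact since 0 ≤ 65+k < 0x110000 on the admitted slots. -/
def letterFoldB (nombres : List String) (i j : Int) (respuesta : List (List String)) : List (List String) :=
  (PySem.List.pyRange i (j + 1) 1).foldl
    (fun acc k => acc ++ nombres.map (fun n => [n, String.ofList [Char.ofNat (65 + k).toNat]]))
    respuesta

/-- The body of B's `for x in horario_texto.split(";")` loop.
`getD … 0` stands for the raising lookup; Pre_ keeps the key present (KeyError excluded). -/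
def stepB (respuesta : List (List String)) (x : String) : List (List String) :=
  let nombre := PySem.Str.strip (PySem.Str.slice x none (some (-14)))
  let slot := PySem.Str.slice x (some (-13)) none
  let i := inicioB.getD (PySem.Str.slice slot none (some 5)) 0
  let j := finB.getD (PySem.Str.slice slot (some (-5)) none) 0
  let nombres := if 2 < PySem.Str.len nombre then PySem.Str.split₀ nombre else [nombre]
  letterFoldB nombres i j respuesta

def parsear_horario_alt (horario_texto : Option String) : List (List String) :=
  match horario_texto with
  | none => []
  | some s =>
    if s.toList.isEmpty then [] else ((PySem.Str.split? s ";").getD []).foldl stepB []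

-- ===== PRECONDITION & SPEC =====
def clavesValidas : List String :=
  ["08:30 - 09:50", "10:00 - 11:20", "11:30 - 12:50", "13:00 - 14:20", "14:30 - 15:50",
   "16:00 - 17:20", "17:25 - 18:45", "18:50 - 20:10", "20:15 - 21:35",
   "08:30 - 11:20", "10:00 - 12:50", "11:30 - 14:20", "13:00 - 15:50", "14:30 - 17:20",
   "16:00 - 18:45", "17:25 - 20:10", "18:50 - 21:30", "18:50 - 21:35"]

-- Pre_ excludes exactly the inputs where Python A raises KeyError: a nonempty text with
-- some semicolon-separated event whose last-13-character slot is not a known timeslot key.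
def Pre_parsear_horario (horario_texto : Option String) : Prop :=
  match horario_texto with
  | none => True
  | some s => s.toList = [] ∨
      ∀ x ∈ (PySem.Str.split? s ";").getD [], PySem.Str.slice x (some (-13)) none ∈ clavesValidas

instance (horario_texto : Option String) : Decidable (Pre_parsear_horario horario_texto) := by
  unfold Pre_parsear_horario; cases horario_texto <;> infer_instance

def pvWitness_parsear_horario : Option String := some "CIT1000 08:30 - 09:50;MAT SEC2 18:50 - 21:35"

def Spec_parsear_horario (horario_texto : Option String) (out : List (List String)) : Prop := out = parsear_horario_alt horario_texto
instance (horario_texto : Option String) (out : List (List String)) : Decidable (Spec_parsear_horario horario_texto out) := by unfold Spec_parsear_horario; infer_instance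

-- ===== CLAIM (what is proved, stated in full; the proofs are below) =====
def Claim_equal_parsear_horario : Prop := ∀ (horario_texto : Option String), Dom_parsear_horario horario_texto → Pre_parsear_horario horario_texto → Spec_parsear_horario horario_texto (parsear_horario horario_texto)

-- ===== LEMMAS AND PROOFS =====

/-- A's simple-block branch equals B's one-index letter range. -/
lemma case_simple (acc : List (List String)) (nombre clave : String) (i : Int)
    (hc : bloquesA.contains clave = true)
    (hr : PySem.List.pyRange (inicioB.getD (PySem.Str.slice clave none (some 5)) 0)
            (finB.getD (PySem.Str.slice clave (some (-5)) none) 0 + 1) 1 = [i])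
    (hb : bloquesA.getD clave "" = String.ofList [Char.ofNat (65 + i).toNat]) :
    stepA acc (nombre, clave)
      = letterFoldB (if 2 < PySem.Str.len nombre then PySem.Str.split₀ nombre else [nombre])
          (inicioB.getD (PySem.Str.slice clave none (some 5)) 0)
          (finB.getD (PySem.Str.slice clave (some (-5)) none) 0) acc := by
  simp only [letterFoldB, hr, List.foldl_cons, List.foldl_nil]
  simp only [stepA, hc, if_true, hb]
  split <;> rfl

/-- A's extended-block branch equals B's two-index letter range. -/
lemma case_ext (acc : List (List String)) (nombre clave : String) (i j : Int)
    (hc : bloquesA.contains clave = false)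
    (hr : PySem.List.pyRange (inicioB.getD (PySem.Str.slice clave none (some 5)) 0)
            (finB.getD (PySem.Str.slice clave (some (-5)) none) 0 + 1) 1 = [i, j])
    (h0 : (bloquesExtA.getD clave "").toList.getD 0 ' ' = Char.ofNat (65 + i).toNat)
    (h1 : (bloquesExtA.getD clave "").toList.getD 1 ' ' = Char.ofNat (65 + j).toNat) :
    stepA acc (nombre, clave)
      = letterFoldB (if 2 < PySem.Str.len nombre then PySem.Str.split₀ nombre else [nombre])
          (inicioB.getD (PySem.Str.slice clave none (some 5)) 0)
          (finB.getD (PySem.Str.slice clave (some (-5)) none) 0) acc := by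
  simp only [letterFoldB, hr, List.foldl_cons, List.foldl_nil]
  simp only [stepA, hc, Bool.false_eq_true, if_false, h0, h1]
  split <;> rfl

/-- Per-event agreement: for a known slot key, A's four-way branch equals B's
letter range computed from the slot's time endpoints. -/
lemma step_eq (acc : List (List String)) (nombre clave : String)
    (h : clave ∈ clavesValidas) :
    stepA acc (nombre, clave)
      = letterFoldB (if 2 < PySem.Str.len nombre then PySem.Str.split₀ nombre else [nombre])
          (inicioB.getD (PySem.Str.slice clave none (some 5)) 0)
          (finB.getD (PySem.Str.slice clave (some (-5)) none) 0) acc := by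
  simp only [clavesValidas, List.mem_cons, List.not_mem_nil, or_false] at h
  rcases h with h | h | h | h | h | h | h | h | h | h | h | h | h | h | h | h | h | h <;> subst h
  · exact case_simple acc nombre _ 0 (by decide) (by decide) (by decide)
  · exact case_simple acc nombre _ 1 (by decide) (by decide) (by decide)
  · exact case_simple acc nombre _ 2 (by decide) (by decide) (by decide)
  · exact case_simple acc nombre _ 3 (by decide) (by decide) (by decide)
  · exact case_simple acc nombre _ 4 (by decide) (by decide) (by decide)
  · exact case_simple acc nombre _ 5 (by decide) (by decide) (by decide)
  · exact case_simple acc nombre _ 6 (by decide) (by decide) (by decide)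
  · exact case_simple acc nombre _ 7 (by decide) (by decide) (by decide)
  · exact case_simple acc nombre _ 8 (by decide) (by decide) (by decide)
  · exact case_ext acc nombre _ 0 1 (by decide) (by decide) (by decide) (by decide)
  · exact case_ext acc nombre _ 1 2 (by decide) (by decide) (by decide) (by decide)
  · exact case_ext acc nombre _ 2 3 (by decide) (by decide) (by decide) (by decide)
  · exact case_ext acc nombre _ 3 4 (by decide) (by decide) (by decide) (by decide)
  · exact case_ext acc nombre _ 4 5 (by decide) (by decide) (by decide) (by decide)
  · exact case_ext acc nombre _ 5 6 (by decide) (by decide) (by decide) (by decide)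
  · exact case_ext acc nombre _ 6 7 (by decide) (by decide) (by decide) (by decide)
  · exact case_ext acc nombre _ 7 8 (by decide) (by decide) (by decide) (by decide)
  · exact case_ext acc nombre _ 7 8 (by decide) (by decide) (by decide) (by decide)

lemma stepB_eq (acc : List (List String)) (x : String)
    (h : PySem.Str.slice x (some (-13)) none ∈ clavesValidas) :
    stepA acc (PySem.Str.strip (PySem.Str.slice x none (some (-14))),
               PySem.Str.slice x (some (-13)) none) = stepB acc x := by
  rw [step_eq _ _ _ h]; rfl

lemma foldl_eq (l : List String) (acc : List (List String))
    (h : ∀ x ∈ l, PySem.Str.slice x (some (-13)) none ∈ clavesValidas) :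
    (l.map (fun x => (PySem.Str.strip (PySem.Str.slice x none (some (-14))),
                      PySem.Str.slice x (some (-13)) none))).foldl stepA acc
      = l.foldl stepB acc := by
  induction l generalizing acc with
  | nil => rfl
  | cons y t ih =>
    simp only [List.map_cons, List.foldl_cons]
    rw [stepB_eq acc y (h y (by simp))]
    exact ih _ (fun x hx => h x (by simp [hx]))

-- ===== VERDICT (by name: the statement is the Claim_ definition above) =====
theorem parsear_horario_spec : Claim_equal_parsear_horario := by
  intro ht _ hpre
  unfold Spec_parsear_horario parsear_horario parsear_horario_alt
  cases ht with
  | none => rfl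
  | some s =>
    simp only
    by_cases hs : s.toList.isEmpty
    · simp [hs]
    · simp only [hs]
      rcases hpre with hnil | hkeys
      · exact absurd (by simp [hnil] : s.toList.isEmpty) hs
      · exact foldl_eq _ [] hkeys
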